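-- pv_equiv track=rewrite | github.com/vnikov/Fall-2017 | CS111/PS3/ps3pr2.py | consonants_rec
-- ===== SOURCE A (Python) =====
-- def consonants_rec(s):
--     ''' return a list containing the consonants (if any) in s '''
--     if len(s) == 0:
--         return []
--     else:
--         if s[0] not in 'aeiou':
--             return [s[0]] + consonants_rec(s[1:])
--         else:
--             return consonants_rec(s[1:])
-- ===== SOURCE B (Python) =====
-- def consonants_rec(s):
--     ''' return a list containing the consonants (if any) in s '''
--     result = []
--     for c in s:
--         if c not in 'aeiou':
--             result.append(c)
--     return result
-- ===== Notes on version B (the rewrite author's own statement) =====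
-- stated objective: simpler
-- what changed: Replaces A's recursion on the string tail (with repeated s[1:] slicing and list concatenation) by a single iterative pass appending to an accumulator list.
import Mathlib
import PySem

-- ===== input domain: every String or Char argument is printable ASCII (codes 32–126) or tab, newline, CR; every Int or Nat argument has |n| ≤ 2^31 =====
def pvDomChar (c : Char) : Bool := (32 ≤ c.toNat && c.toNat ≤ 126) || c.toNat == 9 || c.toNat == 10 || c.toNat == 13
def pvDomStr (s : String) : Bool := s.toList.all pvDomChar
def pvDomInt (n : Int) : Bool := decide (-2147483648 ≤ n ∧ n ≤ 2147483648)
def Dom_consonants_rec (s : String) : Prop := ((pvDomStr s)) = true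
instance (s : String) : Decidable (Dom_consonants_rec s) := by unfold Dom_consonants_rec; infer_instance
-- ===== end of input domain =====

-- B replaces A's recursion on the string tail by a single iterative accumulator pass (objective: simpler).

-- ===== PORT A =====
-- A recurses on the string: len(s)==0 → [], else tests s[0] against 'aeiou' and recurses on s[1:].
def consonantsRecGoA : List Char → List String
  | [] => []
  | c :: t =>
    if ¬ (c ∈ ['a', 'e', 'i', 'o', 'u']) then
      [String.singleton c] ++ consonantsRecGoA t
    else
      consonantsRecGoA t

def consonants_rec (s : String) : List String := consonantsRecGoA s.toList

-- ===== PORT B =====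
-- B: result = []; for c in s: if c not in 'aeiou': result.append(c); return result.
def consonants_rec_alt (s : String) : List String :=
  s.toList.foldl
    (fun result c =>
      if ¬ (c ∈ ['a', 'e', 'i', 'o', 'u']) then result ++ [String.singleton c] else result)
    []

-- ===== PRECONDITION & SPEC =====
def Spec_consonants_rec (s : String) (out : List String) : Prop := out = consonants_rec_alt s
instance (s : String) (out : List String) : Decidable (Spec_consonants_rec s out) := by unfold Spec_consonants_rec; infer_instance

-- ===== CLAIM (what is proved, stated in full; the proofs are below) =====
def Claim_equal_consonants_rec : Prop := ∀ (s : String), Dom_consonants_rec s → Spec_consonants_rec s (consonants_rec s)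

-- ===== LEMMAS AND PROOFS =====
theorem consonantsRec_foldl_eq (l : List Char) (acc : List String) :
    l.foldl
      (fun result c =>
        if ¬ (c ∈ ['a', 'e', 'i', 'o', 'u']) then result ++ [String.singleton c] else result)
      acc = acc ++ consonantsRecGoA l := by
  induction l generalizing acc with
  | nil => simp [consonantsRecGoA]
  | cons c t ih =>
    rw [List.foldl_cons, ih]
    by_cases h : c ∈ ['a', 'e', 'i', 'o', 'u'] <;> simp [consonantsRecGoA, h]

-- ===== VERDICT (by name: the statement is the Claim_ definition above) =====
theorem consonants_rec_spec : Claim_equal_consonants_rec := by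
  intro s _
  unfold Spec_consonants_rec consonants_rec consonants_rec_alt
  simpa using (consonantsRec_foldl_eq s.toList []).symm
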